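-- pv_equiv track=rewrite | github.com/claralea/padoc | report_generator.py | _extract_ai_sections
-- ===== SOURCE A (Python) =====
-- from typing import Dict, Any, Optional, List
--
-- def _extract_ai_sections(ai_content: str) -> Dict[str, str]:
--     """Extract individual sections from AI-generated content"""
--     sections = {}
--
--     if not ai_content:
--         return sections
--
--     # Define section patterns to look for
--     section_patterns = [
--         ("Deviation Summary", ["**Deviation Summary**", "**1. Deviation Summary**", "1. **Deviation Summary**"]),
--         ("Event Timeline", ["**Event Timeline**", "**2. Event Timeline**", "2. **Event Timeline**"]),
--         ("Root Cause Analysis", ["**Root Cause Analysis**", "**3. Root Cause Analysis**", "3. **Root Cause Analysis**"]),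
--         ("Impact Assessment", ["**Impact Assessment**", "**4. Impact Assessment**", "4. **Impact Assessment**"]),
--         ("CAPA Plan", ["**Corrective and Preventive Action (CAPA) Plan**", "**5. Corrective and Preventive Action (CAPA) Plan**", "5. **Corrective and Preventive Action (CAPA) Plan**", "**CAPA Plan**"])
--     ]
--
--     lines = ai_content.split('\n')
--     current_section = None
--     current_content = []
--
--     for line in lines:
--         line = line.strip()
--
--         # Check if this line starts a new section
--         found_section = None
--         for section_name, patterns in section_patterns:
--             for pattern in patterns:
--                 if pattern in line:
--                     found_section = section_name
--                     break
--             if found_section: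
--                 break
--
--         if found_section:
--             # Save previous section if exists
--             if current_section and current_content:
--                 sections[current_section] = '\n'.join(current_content).strip()
--
--             # Start new section
--             current_section = found_section
--             current_content = []
--         elif current_section and line:
--             # Add content to current section (skip the header line)
--             if not any(pattern in line for _, patterns in section_patterns for pattern in patterns):
--                 current_content.append(line)
--
--     # Save the last section
--     if current_section and current_content:
--         sections[current_section] = '\n'.join(current_content).strip()
--
--     return sections
-- ===== SOURCE B (Python) =====
-- _SECTION_PATTERNS = [
--     ("Deviation Summary", ["**Deviation Summary**", "**1. Deviation Summary**", "1. **Deviation Summary**"]),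
--     ("Event Timeline", ["**Event Timeline**", "**2. Event Timeline**", "2. **Event Timeline**"]),
--     ("Root Cause Analysis", ["**Root Cause Analysis**", "**3. Root Cause Analysis**", "3. **Root Cause Analysis**"]),
--     ("Impact Assessment", ["**Impact Assessment**", "**4. Impact Assessment**", "4. **Impact Assessment**"]),
--     ("CAPA Plan", ["**Corrective and Preventive Action (CAPA) Plan**", "**5. Corrective and Preventive Action (CAPA) Plan**", "5. **Corrective and Preventive Action (CAPA) Plan**", "**CAPA Plan**"])
-- ]
--
--
-- def _header_name(line):
--     for section_name, patterns in _SECTION_PATTERNS: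
--         for pattern in patterns:
--             if pattern in line:
--                 return section_name
--     return None
--
--
-- def _extract_ai_sections(ai_content):
--     """Chunked scan: find a header, then consume its body in an inner loop."""
--     sections = {}
--     if not ai_content:
--         return sections
--
--     lines = [line.strip() for line in ai_content.split('\n')]
--     it = iter(lines)
--     cur = next(it, None)
--     while cur is not None:
--         name = _header_name(cur)
--         cur = next(it, None)
--         if name is None:
--             continue
--         body = []
--         while cur is not None and _header_name(cur) is None:
--             if cur:
--                 body.append(cur)
--             cur = next(it, None)
--         if body:
--             sections[name] = '\n'.join(body).strip()
--     return sections
-- ===== Notes on version B (the rewrite author's own statement) =====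
-- stated objective: alternative
-- what changed: Replaces A's single-pass state machine (running current_section/current_content accumulator saved at the next header or at EOF, plus a redundant second pattern scan per content line) with a chunked scan over an iterator: find a header, consume that section's body in an inner loop, and save it immediately.
import Mathlib
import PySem

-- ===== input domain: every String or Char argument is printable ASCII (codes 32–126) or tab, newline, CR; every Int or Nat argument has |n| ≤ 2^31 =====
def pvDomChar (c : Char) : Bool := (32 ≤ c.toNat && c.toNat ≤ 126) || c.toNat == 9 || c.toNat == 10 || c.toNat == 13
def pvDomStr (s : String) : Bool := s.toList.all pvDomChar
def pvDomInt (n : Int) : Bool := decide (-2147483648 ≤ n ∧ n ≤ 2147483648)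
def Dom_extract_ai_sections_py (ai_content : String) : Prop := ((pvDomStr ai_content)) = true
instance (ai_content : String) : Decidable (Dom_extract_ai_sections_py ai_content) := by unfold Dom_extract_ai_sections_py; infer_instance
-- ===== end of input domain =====

-- B replaces A's running current-section/accumulator state machine by a chunked scan (find a header,
-- then consume that section's body in an inner loop, saving immediately); objective: alternative decomposition.

-- ===== PORT A =====
-- the module's section_patterns literal, shared by both ports
def pvPatterns : List (String × List String) :=
  [("Deviation Summary", ["**Deviation Summary**", "**1. Deviation Summary**", "1. **Deviation Summary**"]),
   ("Event Timeline", ["**Event Timeline**", "**2. Event Timeline**", "2. **Event Timeline**"]),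
   ("Root Cause Analysis", ["**Root Cause Analysis**", "**3. Root Cause Analysis**", "3. **Root Cause Analysis**"]),
   ("Impact Assessment", ["**Impact Assessment**", "**4. Impact Assessment**", "4. **Impact Assessment**"]),
   ("CAPA Plan", ["**Corrective and Preventive Action (CAPA) Plan**", "**5. Corrective and Preventive Action (CAPA) Plan**", "5. **Corrective and Preventive Action (CAPA) Plan**", "**CAPA Plan**"])]

-- A's nested pattern scan with break: the first section one of whose patterns occurs in the line
def pvFindSectionA (line : String) : Option String :=
  pvPatterns.findSome? (fun np => if np.2.any (fun p => PySem.Str.isIn p line) then some np.1 else none)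

-- one iteration of A's for-loop; state = (sections, current_section, current_content);
-- 'if current_section' is truthiness of a section name, all of which are nonempty, hence Option.isSome
def pvStepA (st : PySem.Dict String String × Option String × List String) (rawline : String) :
    PySem.Dict String String × Option String × List String :=
  let line := PySem.Str.strip rawline
  match st with
  | (sections, current_section, current_content) =>
    match pvFindSectionA line with
    | some found_section =>
      let sections :=
        match current_section with
        | some c =>
          if current_content ≠ [] then
            sections.insert c (PySem.Str.strip (PySem.Str.join "\n" current_content))
          else sections
        | none => sections
      (sections, some found_section, [])
    | none =>
      match current_section with
      | some _ =>
        if line ≠ "" then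
          if !(pvPatterns.any (fun np => np.2.any (fun p => PySem.Str.isIn p line))) then
            (sections, current_section, current_content ++ [line])
          else (sections, current_section, current_content)
        else (sections, current_section, current_content)
      | none => (sections, current_section, current_content)

def extract_ai_sections_py (ai_content : String) : List (String × String) :=
  if ai_content = "" then []
  else
    let lines := (PySem.Str.split? ai_content "\n").getD []
    match lines.foldl pvStepA (PySem.Dict.empty, none, []) with
    | (sections, current_section, current_content) =>
      (match current_section with
       | some c =>
         if current_content ≠ [] then
           sections.insert c (PySem.Str.strip (PySem.Str.join "\n" current_content))
         else sections
       | none => sections).items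

-- ===== PORT B =====
-- Source B's _header_name
def pvHeaderNameB (line : String) : Option String :=
  pvPatterns.findSome? (fun np => if np.2.any (fun p => PySem.Str.isIn p line) then some np.1 else none)

-- cur = next(it, None) on a list iterator
def pvNext (it : List String) : Option String × List String :=
  match it with
  | [] => (none, [])
  | x :: t => (some x, t)

def pvMeasB (cur : Option String) (it : List String) : Nat :=
  it.length + (if cur.isSome then 1 else 0)

theorem pvMeas_next_lt (c : String) (it : List String) :
    pvMeasB (pvNext it).1 (pvNext it).2 < pvMeasB (some c) it :=
  match it with
  | [] => Nat.one_pos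
  | _ :: t => Nat.lt_succ_self (t.length + 1)

-- Source B's inner while loop, as structural recursion on the iterator's remaining list:
-- pvInnerGo c it = the loop run with cur = c; it returns (body, state of (cur, it) at exit)
def pvInnerGo (c : String) (it : List String) : List String × (Option String × List String) :=
  match pvHeaderNameB c with
  | some _ => ([], (some c, it))
  | none =>
    match it with
    | [] => ((if c ≠ "" then [c] else []), (none, []))
    | x :: t =>
      let r := pvInnerGo x t
      ((if c ≠ "" then c :: r.1 else r.1), r.2)

def pvInnerB (cur : Option String) (it : List String) : List String × (Option String × List String) :=
  match cur with
  | none => ([], (none, it))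
  | some c => pvInnerGo c it

theorem pvInnerGo_meas_le (c : String) (it : List String) :
    pvMeasB (pvInnerGo c it).2.1 (pvInnerGo c it).2.2 ≤ pvMeasB (some c) it := by
  induction it generalizing c with
  | nil =>
    cases h : pvHeaderNameB c
    · simp only [pvInnerGo, h]
      exact Nat.zero_le _
    · simp only [pvInnerGo, h]
      exact Nat.le_refl _
  | cons x t ih =>
    cases h : pvHeaderNameB c
    · simp only [pvInnerGo, h]
      exact Nat.le_succ_of_le (ih x)
    · simp only [pvInnerGo, h]
      exact Nat.le_refl _

theorem pvMeas_inner_lt (c : String) (it : List String) :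
    pvMeasB (pvInnerB (pvNext it).1 (pvNext it).2).2.1 (pvInnerB (pvNext it).1 (pvNext it).2).2.2 <
      pvMeasB (some c) it :=
  match it with
  | [] => Nat.one_pos
  | x :: t => Nat.lt_of_le_of_lt (pvInnerGo_meas_le x t) (Nat.lt_succ_self (t.length + 1))

-- Source B's outer while loop
def pvOuterB (sections : PySem.Dict String String) (cur : Option String) (it : List String) :
    PySem.Dict String String :=
  match cur with
  | none => sections
  | some c =>
    match pvHeaderNameB c with
    | none =>
      let st := pvNext it
      pvOuterB sections st.1 st.2
    | some name =>
      let st := pvNext it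
      let r := pvInnerB st.1 st.2
      let sections :=
        if r.1 ≠ [] then sections.insert name (PySem.Str.strip (PySem.Str.join "\n" r.1))
        else sections
      pvOuterB sections r.2.1 r.2.2
termination_by pvMeasB cur it
decreasing_by
  · exact pvMeas_next_lt c it
  · exact pvMeas_inner_lt c it

def extract_ai_sections_py_alt (ai_content : String) : List (String × String) :=
  if ai_content = "" then []
  else
    let lines := ((PySem.Str.split? ai_content "\n").getD []).map PySem.Str.strip
    let st := pvNext lines
    (pvOuterB PySem.Dict.empty st.1 st.2).items

-- ===== PRECONDITION & SPEC =====
def Spec_extract_ai_sections_py (ai_content : String) (out : List (String × String)) : Prop := out = extract_ai_sections_py_alt ai_content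
instance (ai_content : String) (out : List (String × String)) : Decidable (Spec_extract_ai_sections_py ai_content out) := by unfold Spec_extract_ai_sections_py; infer_instance

-- ===== CLAIM (what is proved, stated in full; the proofs are below) =====
def Claim_equal_extract_ai_sections_py : Prop := ∀ (ai_content : String), Dom_extract_ai_sections_py ai_content → Spec_extract_ai_sections_py ai_content (extract_ai_sections_py ai_content)

-- ===== LEMMAS AND PROOFS =====

-- A's step on an already-stripped line
def pvStepA' (st : PySem.Dict String String × Option String × List String) (line : String) :
    PySem.Dict String String × Option String × List String :=
  match st with
  | (sections, current_section, current_content) =>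
    match pvFindSectionA line with
    | some found_section =>
      let sections :=
        match current_section with
        | some c =>
          if current_content ≠ [] then
            sections.insert c (PySem.Str.strip (PySem.Str.join "\n" current_content))
          else sections
        | none => sections
      (sections, some found_section, [])
    | none =>
      match current_section with
      | some _ =>
        if line ≠ "" then
          if !(pvPatterns.any (fun np => np.2.any (fun p => PySem.Str.isIn p line))) then
            (sections, current_section, current_content ++ [line])
          else (sections, current_section, current_content)
        else (sections, current_section, current_content)
      | none => (sections, current_section, current_content)

-- A's save-on-boundary code
def pvFin (sections : PySem.Dict String String) (cur : Option String) (acc : List String) :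
    PySem.Dict String String :=
  match cur with
  | some c =>
    if acc ≠ [] then sections.insert c (PySem.Str.strip (PySem.Str.join "\n" acc)) else sections
  | none => sections

theorem pvHeaderNameB_eq (line : String) : pvHeaderNameB line = pvFindSectionA line := rfl

-- step equations for A's loop body
theorem pvStepA'_header {l n : String} (hd : pvFindSectionA l = some n)
    (d : PySem.Dict String String) (cur : Option String) (acc : List String) :
    pvStepA' (d, cur, acc) l = (pvFin d cur acc, some n, []) := by
  cases cur <;> simp [pvStepA', hd, pvFin]

theorem pvStepA'_skip {l : String} (hd : pvFindSectionA l = none)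
    (d : PySem.Dict String String) (acc : List String) :
    pvStepA' (d, none, acc) l = (d, none, acc) := by
  simp [pvStepA', hd]

theorem pvStepA'_empty {l : String} (hd : pvFindSectionA l = none) (hl : l = "")
    (d : PySem.Dict String String) (c : String) (acc : List String) :
    pvStepA' (d, some c, acc) l = (d, some c, acc) := by
  subst hl; simp [pvStepA', hd]

theorem pvStepA'_body {l : String} (hd : pvFindSectionA l = none) (hl : l ≠ "")
    (d : PySem.Dict String String) (c : String) (acc : List String) :
    pvStepA' (d, some c, acc) l = (d, some c, acc ++ [l]) := by
  -- the redundant inner any-check of A is always false on a non-header line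
  simp [pvStepA', hd, hl]
  intro a b hmem x hx
  have h2 := List.findSome?_eq_none_iff.mp hd (a, b) hmem
  simp at h2
  exact h2 x hx

-- unfolding equations for B's loops
theorem pvInnerB_none (it : List String) : pvInnerB none it = ([], (none, it)) := rfl

theorem pvInnerB_header {c n : String} (hb : pvHeaderNameB c = some n) (it : List String) :
    pvInnerB (some c) it = ([], (some c, it)) := by
  show pvInnerGo c it = _
  rw [pvInnerGo.eq_def, hb]

theorem pvInnerB_cont {c : String} (hb : pvHeaderNameB c = none) (it : List String) :
    pvInnerB (some c) it =
      ((if c ≠ "" then c :: (pvInnerB (pvNext it).1 (pvNext it).2).1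
        else (pvInnerB (pvNext it).1 (pvNext it).2).1),
       (pvInnerB (pvNext it).1 (pvNext it).2).2) := by
  cases it with
  | nil => show pvInnerGo c [] = _; rw [pvInnerGo.eq_def, hb]; simp [pvInnerB, pvNext]
  | cons x t => show pvInnerGo c (x :: t) = _; rw [pvInnerGo.eq_def, hb]; simp [pvInnerB, pvNext]

theorem pvOuterB_none (d : PySem.Dict String String) (it : List String) :
    pvOuterB d none it = d := by
  simp [pvOuterB]

theorem pvOuterB_skip {c : String} (hb : pvHeaderNameB c = none)
    (d : PySem.Dict String String) (it : List String) :
    pvOuterB d (some c) it = pvOuterB d (pvNext it).1 (pvNext it).2 := by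
  rw [pvOuterB, hb]

theorem pvOuterB_sec {c n : String} (hb : pvHeaderNameB c = some n)
    (d : PySem.Dict String String) (it : List String) :
    pvOuterB d (some c) it =
      pvOuterB (pvFin d (some n) (pvInnerB (pvNext it).1 (pvNext it).2).1)
        (pvInnerB (pvNext it).1 (pvNext it).2).2.1 (pvInnerB (pvNext it).1 (pvNext it).2).2.2 := by
  rw [pvOuterB, hb]; rfl

theorem pvA_some (ls : List String) : ∀ (d : PySem.Dict String String) (c : String) (acc : List String),
    pvFin (ls.foldl pvStepA' (d, some c, acc)).1 (ls.foldl pvStepA' (d, some c, acc)).2.1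
        (ls.foldl pvStepA' (d, some c, acc)).2.2 =
      pvOuterB (pvFin d (some c) (acc ++ (pvInnerB (pvNext ls).1 (pvNext ls).2).1))
        (pvInnerB (pvNext ls).1 (pvNext ls).2).2.1 (pvInnerB (pvNext ls).1 (pvNext ls).2).2.2 := by
  induction ls with
  | nil =>
    intro d c acc
    simp [pvNext, pvInnerB_none, pvOuterB_none]
  | cons l t ih =>
    intro d c acc
    simp only [List.foldl_cons, pvNext]
    cases hd : pvFindSectionA l with
    | some n =>
      have hb : pvHeaderNameB l = some n := by rw [pvHeaderNameB_eq, hd]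
      rw [pvStepA'_header hd, ih (pvFin d (some c) acc) n [], pvInnerB_header hb]
      simp only [List.append_nil, List.nil_append]
      rw [pvOuterB_sec hb]
    | none =>
      have hb : pvHeaderNameB l = none := by rw [pvHeaderNameB_eq, hd]
      rw [pvInnerB_cont hb]
      by_cases hl : l = ""
      · rw [pvStepA'_empty hd hl, ih d c acc]
        simp [hl]
      · rw [pvStepA'_body hd hl, ih d c (acc ++ [l])]
        simp [hl]

theorem pvA_none (ls : List String) : ∀ (d : PySem.Dict String String),
    pvFin (ls.foldl pvStepA' (d, none, [])).1 (ls.foldl pvStepA' (d, none, [])).2.1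
        (ls.foldl pvStepA' (d, none, [])).2.2 =
      pvOuterB d (pvNext ls).1 (pvNext ls).2 := by
  induction ls with
  | nil => intro d; simp [pvNext, pvFin, pvOuterB_none]
  | cons l t ih =>
    intro d
    simp only [List.foldl_cons, pvNext]
    cases hd : pvFindSectionA l with
    | some n =>
      have hb : pvHeaderNameB l = some n := by rw [pvHeaderNameB_eq, hd]
      rw [pvStepA'_header hd]
      rw [show pvFin d none [] = d from rfl]
      rw [pvA_some t d n []]
      simp only [List.nil_append]
      rw [pvOuterB_sec hb]
    | none =>
      have hb : pvHeaderNameB l = none := by rw [pvHeaderNameB_eq, hd]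
      rw [pvStepA'_skip hd, ih d, pvOuterB_skip hb]

-- ===== VERDICT (by name: the statement is the Claim_ definition above) =====
theorem extract_ai_sections_py_spec : Claim_equal_extract_ai_sections_py := by
  intro ai_content _
  unfold Spec_extract_ai_sections_py extract_ai_sections_py extract_ai_sections_py_alt
  by_cases h : ai_content = ""
  · simp [h]
  · simp only [h, if_false]
    have hfold : ((PySem.Str.split? ai_content "\n").getD []).foldl pvStepA
        (PySem.Dict.empty, none, []) =
        (((PySem.Str.split? ai_content "\n").getD []).map PySem.Str.strip).foldl pvStepA'
          (PySem.Dict.empty, none, []) := by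
      rw [List.foldl_map]
      rfl
    rw [hfold]
    have hmain := pvA_none (((PySem.Str.split? ai_content "\n").getD []).map PySem.Str.strip)
      PySem.Dict.empty
    rcases hst : ((((PySem.Str.split? ai_content "\n").getD []).map PySem.Str.strip).foldl pvStepA'
        (PySem.Dict.empty, none, [])) with ⟨d, cur, acc⟩
    rw [hst] at hmain
    simp only at hmain
    cases cur <;> simpa [pvFin] using congrArg PySem.Dict.items hmain
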